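-- pv_equiv track=rewrite | github.com/ActiveState/OpenKomodoIDE | util/mknightly.py | _join_short_ver
-- ===== SOURCE A (Python) =====
-- def _join_short_ver(ver_tuple, pad_zeros=None):
--     """Join the given version-tuple, inserting '.' as appropriate.
--
--     @param pad_zeros {int} is a number of numeric parts before any
--         "quality" letter (e.g. 'a' for alpha).
--
--     >>> _join_short_ver( ('4', '1', '0') )
--     '4.1.0'
--     >>> _join_short_ver( ('1', '3', 'a', '2') )
--     '1.3a2'
--     >>> _join_short_ver(('1', '3', 'a', '2'), pad_zeros=3)
--     '1.3.0a2'
--     >>> _join_short_ver(('1', '3'), pad_zeros=3)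
--     '1.3.0'
--     """
--     def isint(s):
--         try:
--             int(s)
--         except ValueError:
--             return False
--         else:
--             return True
--
--     if pad_zeros:
--         bits = []
--         hit_quality_bit = False
--         for bit in ver_tuple:
--             if not hit_quality_bit and not isint(bit):
--                 hit_quality_bit = True
--                 while len(bits) < pad_zeros:
--                     bits.append(0)
--             bits.append(bit)
--         if not hit_quality_bit:
--             while len(bits) < pad_zeros:
--                 bits.append(0)
--     else:
--         bits = ver_tuple
--
--     dotted = []
--     for bit in bits:
--         if dotted and isint(dotted[-1]) and isint(bit):
--             dotted.append('.')
--         dotted.append(str(bit))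
--     return ''.join(dotted)
-- ===== SOURCE B (Python) =====
-- def _join_short_ver(ver_tuple, pad_zeros=None):
--     """Join the given version-tuple, inserting '.' as appropriate."""
--     def isint(s):
--         try:
--             int(s)
--         except ValueError:
--             return False
--         else:
--             return True
--
--     if pad_zeros:
--         k = next((i for i, b in enumerate(ver_tuple) if not isint(b)),
--                  len(ver_tuple))
--         bits = [str(b) for b in ver_tuple[:k]] \
--             + ['0'] * max(0, pad_zeros - k) \
--             + [str(b) for b in ver_tuple[k:]]
--     else:
--         bits = [str(b) for b in ver_tuple]
--
--     # Join runs of like kind: dot-join runs of ints, concat runs of non-ints.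
--     out = []
--     i = 0
--     n = len(bits)
--     while i < n:
--         key = isint(bits[i])
--         j = i + 1
--         while j < n and isint(bits[j]) == key:
--             j += 1
--         run = bits[i:j]
--         out.append('.'.join(run) if key else ''.join(run))
--         i = j
--     return ''.join(out)
-- ===== Notes on version B (the rewrite author's own statement) =====
-- stated objective: idiomatic
-- what changed: Replaces A's flag-threaded padding loop and append-with-lookback dot-insertion loop by computing the split index of the first non-integer part (padding is then a list formula) and joining maximal runs of like kind ('.'-join integer runs, concat non-integer runs).
import Mathlib
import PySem

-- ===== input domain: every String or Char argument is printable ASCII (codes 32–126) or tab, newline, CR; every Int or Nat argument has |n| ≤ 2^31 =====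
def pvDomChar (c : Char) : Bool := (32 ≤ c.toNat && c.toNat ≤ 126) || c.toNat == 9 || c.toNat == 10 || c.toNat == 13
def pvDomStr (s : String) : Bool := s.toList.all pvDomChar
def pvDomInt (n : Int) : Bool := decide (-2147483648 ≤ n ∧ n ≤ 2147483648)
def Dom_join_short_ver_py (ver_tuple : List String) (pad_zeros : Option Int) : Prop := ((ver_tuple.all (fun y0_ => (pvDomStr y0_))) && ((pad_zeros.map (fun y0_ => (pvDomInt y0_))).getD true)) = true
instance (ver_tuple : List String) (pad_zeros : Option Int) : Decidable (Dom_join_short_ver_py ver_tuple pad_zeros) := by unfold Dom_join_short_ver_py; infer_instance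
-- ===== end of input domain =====

-- B replaces A's flag-threaded padding loop and append-with-lookback dot loop by a
-- split-index padding formula plus joining of maximal runs of like kind (idiomatic; same cost).

-- ===== PORT A =====
-- isint(s): int(s) succeeds
def pvIsInt (s : String) : Bool := (PySem.Int.ofStr? s).isSome

-- A's bits list mixes padded ints (0) and the original strings: Int ⊕ String
def pvBitStr : Int ⊕ String → String
  | Sum.inl n => PySem.Int.toStr n
  | Sum.inr s => s

-- isint applied to a raw bit (int(int) always succeeds)
def pvBitIsInt : Int ⊕ String → Bool
  | Sum.inl _ => true
  | Sum.inr s => pvIsInt s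

-- 'while len(bits) < pad_zeros: bits.append(0)'
def pvPad (bits : List (Int ⊕ String)) (pad : Int) : List (Int ⊕ String) :=
  if h : (bits.length : Int) < pad then pvPad (bits ++ [Sum.inl 0]) pad else bits
termination_by (pad - bits.length).toNat
decreasing_by simp only [List.length_append, List.length_cons, List.length_nil]; omega

def join_short_ver_py (ver_tuple : List String) (pad_zeros : Option Int) : String :=
  let truthy : Bool := match pad_zeros with | none => false | some n => n != 0
  let pad : Int := pad_zeros.getD 0
  let bits : List (Int ⊕ String) :=
    if truthy then
      let st := ver_tuple.foldl
        (fun (st : List (Int ⊕ String) × Bool) bit =>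
          if !st.2 && !pvIsInt bit then
            (pvPad st.1 pad ++ [Sum.inr bit], true)
          else
            (st.1 ++ [Sum.inr bit], st.2))
        ([], false)
      if !st.2 then pvPad st.1 pad else st.1
    else ver_tuple.map Sum.inr
  let dotted : List String := bits.foldl
    (fun (dotted : List String) bit =>
      (if !dotted.isEmpty && pvIsInt (dotted.getLastD "") && pvBitIsInt bit
       then dotted ++ ["."] else dotted) ++ [pvBitStr bit])
    []
  PySem.Str.join "" dotted

-- ===== PORT B =====
-- the run-splitting while loop of Source B: peel off one maximal run of like isint-kind at a time
def pvRuns (bits : List String) : List String :=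
  match bits with
  | [] => []
  | b :: rest =>
    let key := pvIsInt b
    let run := b :: rest.takeWhile (fun x => pvIsInt x == key)
    (if key then PySem.Str.join "." run else PySem.Str.join "" run)
      :: pvRuns (rest.dropWhile (fun x => pvIsInt x == key))
termination_by bits.length
decreasing_by
  have := List.length_dropWhile_le (fun x => pvIsInt x == pvIsInt b) rest
  simp only [List.length_cons]; omega

def join_short_ver_py_alt (ver_tuple : List String) (pad_zeros : Option Int) : String :=
  let truthy : Bool := match pad_zeros with | none => false | some n => n != 0
  let bits : List String :=
    if truthy then
      let pad : Int := pad_zeros.getD 0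
      let k : Nat := ver_tuple.findIdx (fun b => !pvIsInt b)
      ver_tuple.take k ++ List.replicate (max 0 (pad - k)).toNat "0" ++ ver_tuple.drop k
    else ver_tuple
  PySem.Str.join "" (pvRuns bits)

-- ===== PRECONDITION & SPEC =====
def Spec_join_short_ver_py (ver_tuple : List String) (pad_zeros : Option Int) (out : String) : Prop := out = join_short_ver_py_alt ver_tuple pad_zeros
instance (ver_tuple : List String) (pad_zeros : Option Int) (out : String) : Decidable (Spec_join_short_ver_py ver_tuple pad_zeros out) := by unfold Spec_join_short_ver_py; infer_instance

-- ===== CLAIM (what is proved, stated in full; the proofs are below) =====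
def Claim_equal_join_short_ver_py : Prop := ∀ (ver_tuple : List String) (pad_zeros : Option Int), Dom_join_short_ver_py ver_tuple pad_zeros → Spec_join_short_ver_py ver_tuple pad_zeros (join_short_ver_py ver_tuple pad_zeros)

-- ===== LEMMAS AND PROOFS =====

-- reference form of A's dot-insertion loop, bit level (last = isint of previous element)
def pvAuxB (last : Bool) : List (Int ⊕ String) → List String
  | [] => []
  | b :: r => (if last && pvBitIsInt b then ["."] else []) ++ pvBitStr b :: pvAuxB (pvBitIsInt b) r

-- the same on plain strings
def pvAuxS (last : Bool) : List String → List String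
  | [] => []
  | s :: r => (if last && pvIsInt s then ["."] else []) ++ s :: pvAuxS (pvIsInt s) r

def pvDottedS : List String → List String
  | [] => []
  | s :: r => s :: pvAuxS (pvIsInt s) r

-- the char flattening common to both sides
def pvJ (l : List String) : List Char := (l.map String.toList).flatten

lemma pvJoin_nil_eq_flatten (L : List (List Char)) :
    PySem.Chars.join [] L = L.flatten := by
  induction L with
  | nil => simp [PySem.Chars.join_nil]
  | cons p rest ih =>
    cases rest with
    | nil => simp [PySem.Chars.join, List.intercalate]
    | cons q r => simp [PySem.Chars.join_cons_cons, ih]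

lemma pvJoin_sep_eq (c : List Char) (p : List Char) (rest : List (List Char)) :
    PySem.Chars.join c (p :: rest) = p ++ (rest.map (fun q => c ++ q)).flatten := by
  induction rest generalizing p with
  | nil => simp [PySem.Chars.join, List.intercalate]
  | cons q r ih => simp [PySem.Chars.join_cons_cons, ih q]

lemma pvPad_eq (l : List (Int ⊕ String)) (pad : Int) :
    pvPad l pad = l ++ List.replicate (pad - l.length).toNat (Sum.inl 0) := by
  rw [pvPad]
  split_ifs with h
  · rw [pvPad_eq]
    have hm : (pad - l.length).toNat = (pad - (l ++ [Sum.inl 0]).length).toNat + 1 := by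
      simp only [List.length_append, List.length_cons, List.length_nil]; omega
    rw [hm, List.replicate_succ]
    simp
  · have hm : (pad - l.length).toNat = 0 := by omega
    simp [hm]
termination_by (pad - l.length).toNat
decreasing_by simp only [List.length_append, List.length_cons, List.length_nil]; omega

lemma pvHitTrue (pad : Int) (v : List String) (acc : List (Int ⊕ String)) :
    v.foldl (fun (st : List (Int ⊕ String) × Bool) bit =>
        if !st.2 && !pvIsInt bit then (pvPad st.1 pad ++ [Sum.inr bit], true)
        else (st.1 ++ [Sum.inr bit], st.2)) (acc, true)
      = (acc ++ v.map Sum.inr, true) := by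
  induction v generalizing acc with
  | nil => simp
  | cons b r ih =>
    simp only [List.foldl_cons, Bool.not_true, Bool.false_and, Bool.false_eq_true, if_false]
    rw [ih]; simp

-- the whole padding phase of A (loop + trailing pad) in closed form
lemma pvPadLoop (pad : Int) (v : List String) (acc : List (Int ⊕ String)) :
    (let st := v.foldl (fun (st : List (Int ⊕ String) × Bool) bit =>
        if !st.2 && !pvIsInt bit then (pvPad st.1 pad ++ [Sum.inr bit], true)
        else (st.1 ++ [Sum.inr bit], st.2)) (acc, false)
     if !st.2 then pvPad st.1 pad else st.1)
      = pvPad (acc ++ (v.take (v.findIdx (fun b => !pvIsInt b))).map Sum.inr) pad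
          ++ (v.drop (v.findIdx (fun b => !pvIsInt b))).map Sum.inr := by
  induction v generalizing acc with
  | nil => simp
  | cons b r ih =>
    by_cases hb : pvIsInt b
    · simp only [List.foldl_cons, Bool.not_false, Bool.and_false, hb, Bool.not_true,
        Bool.false_eq_true, if_false, List.findIdx_cons, cond_false, List.take_succ_cons,
        List.drop_succ_cons, List.map_cons]
      have := ih (acc ++ [Sum.inr b])
      simp only [] at this ⊢
      rw [this]
      simp [List.append_assoc]
    · have hb' : pvIsInt b = false := by simpa using hb
      simp only [List.foldl_cons, hb', Bool.not_false, Bool.and_true, Bool.not_false,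
        if_true, List.findIdx_cons, cond_true, List.take_zero, List.drop_zero,
        List.map_nil, List.append_nil, List.map_cons]
      rw [pvHitTrue]
      simp

lemma pvDropWhile_head_false {α : Type} (p : α → Bool) (l : List α) (x : α) (xs : List α)
    (h : l.dropWhile p = x :: xs) : p x = false := by
  induction l with
  | nil => simp [List.dropWhile] at h
  | cons a r ih =>
    by_cases hp : p a
    · rw [List.dropWhile_cons_of_pos hp] at h; exact ih h
    · rw [List.dropWhile_cons_of_neg hp] at h
      cases h; simpa using hp

-- A's dotted foldl = accumulated prefix ++ pvAuxB
lemma pvDottedFold (bits : List (Int ⊕ String)) (d : List String) (last : Bool)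
    (hne : d ≠ []) (hl : pvIsInt (d.getLastD "") = last)
    (H : ∀ b ∈ bits, pvIsInt (pvBitStr b) = pvBitIsInt b) :
    bits.foldl (fun (dotted : List String) bit =>
        (if !dotted.isEmpty && pvIsInt (dotted.getLastD "") && pvBitIsInt bit
         then dotted ++ ["."] else dotted) ++ [pvBitStr bit]) d
      = d ++ pvAuxB last bits := by
  induction bits generalizing d last with
  | nil => simp [pvAuxB]
  | cons b r ih =>
    have hb := H b (List.mem_cons_self ..)
    have hde : d.isEmpty = false := by
      cases d with
      | nil => exact absurd rfl hne
      | cons x xs => rfl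
    simp only [List.foldl_cons, hde, Bool.not_false, Bool.true_and, hl, pvAuxB]
    rw [ih _ (pvBitIsInt b)
      (by simp)
      (by rw [List.getLastD_concat]; exact hb)
      (fun x hx => H x (List.mem_cons_of_mem _ hx))]
    cases hc : last && pvBitIsInt b <;> simp

-- bit-level aux = string-level aux under H
lemma pvAuxB_map (bits : List (Int ⊕ String)) (last : Bool)
    (H : ∀ b ∈ bits, pvIsInt (pvBitStr b) = pvBitIsInt b) :
    pvAuxB last bits = pvAuxS last (bits.map pvBitStr) := by
  induction bits generalizing last with
  | nil => simp [pvAuxB, pvAuxS]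
  | cons b r ih =>
    have hb := H b (List.mem_cons_self ..)
    simp only [pvAuxB, pvAuxS, List.map_cons, hb]
    rw [ih _ (fun x hx => H x (List.mem_cons_of_mem _ hx))]

-- aux over a run whose elements all have isint = key
lemma pvAuxS_run (key : Bool) (l rest : List String)
    (hl : ∀ s ∈ l, pvIsInt s = key) :
    pvAuxS key (l ++ rest)
      = (l.map (fun s => (if key then ["."] else []) ++ [s])).flatten ++ pvAuxS key rest := by
  induction l with
  | nil => simp
  | cons s r ih =>
    have hs := hl s (List.mem_cons_self ..)
    simp only [List.cons_append, pvAuxS, hs, Bool.and_self]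
    rw [ih (fun x hx => hl x (List.mem_cons_of_mem _ hx))]
    cases key <;> simp

-- B's run joining flattens to the same chars as pvDottedS
-- A's full dotted list (first iteration has an empty accumulator, so no dot)
def pvDottedB : List (Int ⊕ String) → List String
  | [] => []
  | b :: r => pvBitStr b :: pvAuxB (pvBitIsInt b) r

lemma pvDottedFold0 (bits : List (Int ⊕ String))
    (H : ∀ b ∈ bits, pvIsInt (pvBitStr b) = pvBitIsInt b) :
    bits.foldl (fun (dotted : List String) bit =>
        (if !dotted.isEmpty && pvIsInt (dotted.getLastD "") && pvBitIsInt bit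
         then dotted ++ ["."] else dotted) ++ [pvBitStr bit]) []
      = pvDottedB bits := by
  cases bits with
  | nil => rfl
  | cons b r =>
    have hb := H b (List.mem_cons_self ..)
    simp only [List.foldl_cons, List.isEmpty_nil, Bool.not_true, Bool.false_and,
      Bool.false_eq_true, if_false, List.nil_append, pvDottedB]
    exact pvDottedFold r [pvBitStr b] (pvBitIsInt b) (by simp) (by simpa using hb)
      (fun x hx => H x (List.mem_cons_of_mem _ hx))

lemma pvJ_append (l l' : List String) : pvJ (l ++ l') = pvJ l ++ pvJ l' := by
  simp [pvJ]

lemma pvJ_cons (s : String) (l : List String) : pvJ (s :: l) = s.toList ++ pvJ l := by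
  simp [pvJ]

lemma pvStrJoin_eq_of_pvJ {l l' : List String} (h : pvJ l = pvJ l') :
    PySem.Str.join "" l = PySem.Str.join "" l' := by
  unfold PySem.Str.join
  have : ("" : String).toList = [] := rfl
  rw [this, pvJoin_nil_eq_flatten, pvJoin_nil_eq_flatten]
  exact congrArg _ h

lemma pvJ_run (key : Bool) (tw : List String) :
    pvJ ((tw.map (fun s => (if key then ["."] else []) ++ [s])).flatten)
      = ((tw.map String.toList).map
          (fun q => (if key then ['.'] else []) ++ q)).flatten := by
  induction tw with
  | nil => rfl
  | cons s r ih =>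
    simp only [List.map_cons, List.flatten_cons, pvJ_append, ih, pvJ_cons]
    cases key <;> simp [pvJ]

lemma pvRuns_flatten (L : List String) : pvJ (pvRuns L) = pvJ (pvDottedS L) := by
  match L with
  | [] => simp [pvRuns, pvDottedS, pvJ]
  | b :: rest =>
    rw [pvRuns]
    have htw : ∀ s ∈ rest.takeWhile (fun x => pvIsInt x == pvIsInt b), pvIsInt s = pvIsInt b :=
      fun s hs => by simpa using List.mem_takeWhile_imp hs
    have hdw : pvAuxS (pvIsInt b) (rest.dropWhile (fun x => pvIsInt x == pvIsInt b))
        = pvDottedS (rest.dropWhile (fun x => pvIsInt x == pvIsInt b)) := by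
      cases hd : rest.dropWhile (fun x => pvIsInt x == pvIsInt b) with
      | nil => rfl
      | cons t ts =>
        have ht : pvIsInt t ≠ pvIsInt b := by
          simpa using pvDropWhile_head_false _ rest t ts hd
        have hc : (pvIsInt b && pvIsInt t) = false := by
          cases hbb : pvIsInt b
          · simp
          · rw [hbb] at ht
            cases hbt : pvIsInt t
            · simp
            · exact absurd hbt ht
        simp only [pvAuxS, pvDottedS, hc, Bool.false_eq_true, if_false, List.nil_append]
    have hsplit : pvDottedS (b :: rest)
        = b :: pvAuxS (pvIsInt b)
            (rest.takeWhile (fun x => pvIsInt x == pvIsInt b)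
              ++ rest.dropWhile (fun x => pvIsInt x == pvIsInt b)) := by
      simp [pvDottedS, List.takeWhile_append_dropWhile]
    rw [hsplit, pvAuxS_run _ _ _ htw, hdw]
    rw [pvJ_cons, pvJ_cons, pvJ_append, pvJ_run]
    have hjoin : (if pvIsInt b then
          PySem.Str.join "." (b :: rest.takeWhile (fun x => pvIsInt x == pvIsInt b))
        else PySem.Str.join "" (b :: rest.takeWhile (fun x => pvIsInt x == pvIsInt b))).toList
        = b.toList ++ (((rest.takeWhile (fun x => pvIsInt x == pvIsInt b)).map
            String.toList).map
              (fun q => (if pvIsInt b then ['.'] else []) ++ q)).flatten := by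
      cases hk : pvIsInt b
      · simp only [Bool.false_eq_true, if_false, PySem.Str.toList_join, List.map_cons]
        rw [show ("" : String).toList = [] from rfl, pvJoin_nil_eq_flatten]
        simp [Function.comp_def]
      · simp only [if_true, PySem.Str.toList_join, List.map_cons]
        rw [show ("." : String).toList = ['.'] from rfl, pvJoin_sep_eq]
    rw [hjoin, pvRuns_flatten (rest.dropWhile (fun x => pvIsInt x == pvIsInt b))]
    simp [List.append_assoc]
termination_by L.length
decreasing_by
  have := List.length_dropWhile_le (fun x => pvIsInt x == pvIsInt b) rest
  simp only [List.length_cons]; omega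

lemma pvDottedB_map (bits : List (Int ⊕ String))
    (H : ∀ b ∈ bits, pvIsInt (pvBitStr b) = pvBitIsInt b) :
    pvDottedB bits = pvDottedS (bits.map pvBitStr) := by
  cases bits with
  | nil => rfl
  | cons b r =>
    have hb := H b (List.mem_cons_self ..)
    simp only [pvDottedB, pvDottedS, List.map_cons, hb]
    rw [pvAuxB_map _ _ (fun x hx => H x (List.mem_cons_of_mem _ hx))]

-- one common bridge: A's dotted join over any bits list = B's run join over its strings
lemma pvSides (bitsA : List (Int ⊕ String))
    (H : ∀ b ∈ bitsA, pvIsInt (pvBitStr b) = pvBitIsInt b) :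
    PySem.Str.join "" (bitsA.foldl
      (fun (dotted : List String) bit =>
        (if !dotted.isEmpty && pvIsInt (dotted.getLastD "") && pvBitIsInt bit
         then dotted ++ ["."] else dotted) ++ [pvBitStr bit]) [])
      = PySem.Str.join "" (pvRuns (bitsA.map pvBitStr)) := by
  rw [pvDottedFold0 _ H, pvDottedB_map _ H]
  exact pvStrJoin_eq_of_pvJ (pvRuns_flatten _).symm

lemma pvMapInrStr (l : List String) : (l.map Sum.inr).map pvBitStr = l := by
  simp [List.map_map, Function.comp_def, pvBitStr]

lemma pvHinr (l : List String) :
    ∀ b ∈ l.map (Sum.inr : String → Int ⊕ String), pvIsInt (pvBitStr b) = pvBitIsInt b := by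
  intro b hb
  obtain ⟨s, _, rfl⟩ := List.mem_map.1 hb
  rfl

theorem pv_main (ver_tuple : List String) (pad_zeros : Option Int) :
    join_short_ver_py ver_tuple pad_zeros = join_short_ver_py_alt ver_tuple pad_zeros := by
  cases pad_zeros with
  | none =>
    simp only [join_short_ver_py, join_short_ver_py_alt, Bool.false_eq_true, if_false]
    rw [pvSides _ (pvHinr ver_tuple), pvMapInrStr]
  | some n =>
    by_cases hn : n = 0
    · subst hn
      simp only [join_short_ver_py, join_short_ver_py_alt]
      rw [if_neg (by simp), if_neg (by simp)]
      rw [pvSides _ (pvHinr ver_tuple), pvMapInrStr]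
    · have htr : (n != 0) = true := by simpa using hn
      simp only [join_short_ver_py, join_short_ver_py_alt, htr, if_true, Option.getD_some]
      have hpl := pvPadLoop n ver_tuple []
      simp only [List.nil_append] at hpl
      rw [hpl]
      set k := ver_tuple.findIdx (fun b => !pvIsInt b) with hk
      have hklen : k ≤ ver_tuple.length := List.findIdx_le_length
      have hlen : ((ver_tuple.take k).map (Sum.inr : String → Int ⊕ String)).length = k := by
        simp [List.length_take]; omega
      rw [pvPad_eq, hlen]
      have hm : (n - (k : Int)).toNat = (max 0 (n - (k : Int))).toNat := by omega
      -- A's bits map to exactly B's bits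
      have HA : ∀ b ∈ (ver_tuple.take k).map Sum.inr
            ++ List.replicate (n - (k : Int)).toNat (Sum.inl 0)
            ++ (ver_tuple.drop k).map Sum.inr,
          pvIsInt (pvBitStr b) = pvBitIsInt b := by
        intro b hb
        rcases List.mem_append.1 hb with hb' | hb'
        · rcases List.mem_append.1 hb' with hb'' | hb''
          · exact pvHinr _ b hb''
          · rcases List.eq_of_mem_replicate hb'' with rfl
            decide
        · exact pvHinr _ b hb'
      rw [List.append_assoc, pvSides _ (by rw [← List.append_assoc]; exact HA)]
      simp only [List.map_append, pvMapInrStr, List.map_replicate]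
      rw [show pvBitStr (Sum.inl 0) = "0" from rfl, ← hm, ← List.append_assoc]

-- ===== VERDICT (by name: the statement is the Claim_ definition above) =====
theorem join_short_ver_py_spec : Claim_equal_join_short_ver_py := by
  intro v p _
  exact pv_main v p
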